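-- pv_equiv track=rewrite | github.com/dart-archive/webcore | bindings/dart/scripts/dart_interface.py | _suppress_extended_attributes
-- ===== SOURCE A (Python) =====
-- IGNORE_EXTENDED_ATTRIBUTES = {
-- #    'RuntimeEnabled': frozenset(['ExperimentalCanvasFeatures']),
-- }
--
-- def _suppress_extended_attributes(extended_attributes):
--     if 'DartSuppress' in extended_attributes and extended_attributes.get('DartSuppress') == None:
--         return True
--
--     # TODO(terry): Eliminate this using DartSuppress extended attribute in the
--     #              IDL files instead of the IGNORE_EXTENDED_ATTRIBUTES list.
--     for extended_attribute_name in extended_attributes: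
--         ignore_extended_values = IGNORE_EXTENDED_ATTRIBUTES.get(extended_attribute_name)
--         if ignore_extended_values != None:
--             extended_attribute_value = extended_attributes.get(extended_attribute_name)
--             if ((not ignore_extended_values and extended_attribute_value == None) or
--                 extended_attribute_value in ignore_extended_values):
--                 return True
--     return False
-- ===== SOURCE B (Python) =====
-- def _suppress_extended_attributes(extended_attributes):
--     # Suppress exactly when the DartSuppress attribute is present with no value.
--     # (IGNORE_EXTENDED_ATTRIBUTES in the original module is empty, so nothing else matters.)
--     return extended_attributes.get('DartSuppress', False) is None
-- ===== Notes on version B (the rewrite author's own statement) =====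
-- stated objective: simpler
-- what changed: The per-key loop over IGNORE_EXTENDED_ATTRIBUTES (an empty constant, so the loop can never fire) is removed; B is a single dict lookup with a non-None sentinel default, returning True iff 'DartSuppress' maps to None.
import Mathlib
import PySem

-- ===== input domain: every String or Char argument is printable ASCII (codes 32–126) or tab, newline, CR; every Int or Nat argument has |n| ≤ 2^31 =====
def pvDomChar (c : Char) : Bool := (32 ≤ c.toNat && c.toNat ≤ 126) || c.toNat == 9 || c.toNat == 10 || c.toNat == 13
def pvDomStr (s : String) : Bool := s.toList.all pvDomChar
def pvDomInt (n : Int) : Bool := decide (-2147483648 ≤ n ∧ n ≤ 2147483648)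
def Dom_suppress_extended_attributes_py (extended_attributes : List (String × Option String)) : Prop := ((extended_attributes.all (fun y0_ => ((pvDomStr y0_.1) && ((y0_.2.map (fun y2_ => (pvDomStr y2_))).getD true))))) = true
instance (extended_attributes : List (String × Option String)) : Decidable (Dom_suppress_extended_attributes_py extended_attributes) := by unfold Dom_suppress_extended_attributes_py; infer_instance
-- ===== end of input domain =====

-- B drops A's loop over the module constant IGNORE_EXTENDED_ATTRIBUTES, which is empty, and is one dict lookup.
-- ===== PORT A =====
-- IGNORE_EXTENDED_ATTRIBUTES = {} (the one entry is commented out in the source)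
def pvIgnoreExtendedAttributes : PySem.Dict String (List String) := PySem.Dict.empty

-- the 'for extended_attribute_name in extended_attributes:' loop, with early return
def pvSuppressLoop (d : PySem.Dict String (Option String)) : List String → Bool
  | [] => false
  | name :: rest =>
    match pvIgnoreExtendedAttributes.get? name with
    | some ignore_extended_values =>
        let extended_attribute_value := d.getD name none
        if (decide (ignore_extended_values = []) && decide (extended_attribute_value = none)) ||
           (match extended_attribute_value with
            | none => false
            | some s => ignore_extended_values.contains s) then true
        else pvSuppressLoop d rest
    | none => pvSuppressLoop d rest

def suppress_extended_attributes_py (extended_attributes : List (String × Option String)) : Bool :=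
  let d := PySem.Dict.mk extended_attributes
  if d.contains "DartSuppress" && decide (d.getD "DartSuppress" none = none) then true
  else pvSuppressLoop d d.keys

-- ===== PORT B =====
def suppress_extended_attributes_py_alt (extended_attributes : List (String × Option String)) : Bool :=
  -- extended_attributes.get('DartSuppress', False) is None: the sentinel default is not None,
  -- so this is 'the key is present and its value is None'
  match (PySem.Dict.mk extended_attributes).get? "DartSuppress" with
  | some none => true
  | _ => false

-- ===== PRECONDITION & SPEC =====
def Spec_suppress_extended_attributes_py (extended_attributes : List (String × Option String)) (out : Bool) : Prop := out = suppress_extended_attributes_py_alt extended_attributes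
instance (extended_attributes : List (String × Option String)) (out : Bool) : Decidable (Spec_suppress_extended_attributes_py extended_attributes out) := by unfold Spec_suppress_extended_attributes_py; infer_instance

-- ===== CLAIM (what is proved, stated in full; the proofs are below) =====
def Claim_equal_suppress_extended_attributes_py : Prop := ∀ (extended_attributes : List (String × Option String)), Dom_suppress_extended_attributes_py extended_attributes → Spec_suppress_extended_attributes_py extended_attributes (suppress_extended_attributes_py extended_attributes)

-- ===== LEMMAS AND PROOFS =====

lemma pvSuppressLoop_false (d : PySem.Dict String (Option String)) (ks : List String) :
    pvSuppressLoop d ks = false := by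
  induction ks with
  | nil => rfl
  | cons name rest ih =>
      simp [pvSuppressLoop, pvIgnoreExtendedAttributes, PySem.Dict.get?_empty, ih]

-- ===== VERDICT (by name: the statement is the Claim_ definition above) =====
theorem suppress_extended_attributes_py_spec : Claim_equal_suppress_extended_attributes_py := by
  intro ea _
  unfold Spec_suppress_extended_attributes_py suppress_extended_attributes_py
    suppress_extended_attributes_py_alt
  simp only [pvSuppressLoop_false]
  rw [PySem.Dict.contains_eq_isSome_get?, PySem.Dict.getD_eq_get?_getD]
  cases h : (PySem.Dict.mk ea).get? "DartSuppress" with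
  | none => simp
  | some v => cases v <;> simp
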